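-- pv_equiv track=rewrite | github.com/ctan2020/test | list_overlap.py | _list_compare
-- ===== SOURCE A (Python) =====
-- def _list_compare(list1,list2):
-- 	lt1={}	#list1
-- 	for i in list1:
-- 		lt1[i]=1
-- 	lt2={}	#list2
-- 	for i in list2:
-- 		lt2[i]=1
--
-- 	comm={}	#overlap between list1 and list2
-- 	for i in lt2:
-- 		if i in lt1:
--                         comm[i]=1
--
-- 	only1={}	#unique in list1
-- 	only2={}	#unique in list2
-- 	for i in lt1:
-- 		if i not in comm:
-- 			only1[i]=1
-- 	for i in lt2:
-- 		if i not in comm: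
-- 			only2[i]=1
-- 	return [only1,only2,comm]
-- ===== SOURCE B (Python) =====
-- def _list_compare(list1, list2):
--     # one combined table: bit 2 = "in list2", bit 1 = "in list1"
--     flags = {}
--     for x in list2:
--         flags[x] = 2
--     for x in list1:
--         flags[x] = flags.get(x, 0) | 1
--     only1 = {}
--     only2 = {}
--     comm = {}
--     for x, f in flags.items():
--         if f == 3:
--             comm[x] = 1
--         elif f == 1:
--             only1[x] = 1
--         else:
--             only2[x] = 1
--     return [only1, only2, comm]
-- ===== Notes on version B (the rewrite author's own statement) =====
-- stated objective: alternative
-- what changed: Replaces A's two separate membership dicts and three filtering loops (comm, only1, only2) with one combined dict mapping each element to a 2-bit membership flag (scan list2 setting 2, scan list1 OR-ing 1) followed by a single categorizing pass routing each key by its flag.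
import Mathlib
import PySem

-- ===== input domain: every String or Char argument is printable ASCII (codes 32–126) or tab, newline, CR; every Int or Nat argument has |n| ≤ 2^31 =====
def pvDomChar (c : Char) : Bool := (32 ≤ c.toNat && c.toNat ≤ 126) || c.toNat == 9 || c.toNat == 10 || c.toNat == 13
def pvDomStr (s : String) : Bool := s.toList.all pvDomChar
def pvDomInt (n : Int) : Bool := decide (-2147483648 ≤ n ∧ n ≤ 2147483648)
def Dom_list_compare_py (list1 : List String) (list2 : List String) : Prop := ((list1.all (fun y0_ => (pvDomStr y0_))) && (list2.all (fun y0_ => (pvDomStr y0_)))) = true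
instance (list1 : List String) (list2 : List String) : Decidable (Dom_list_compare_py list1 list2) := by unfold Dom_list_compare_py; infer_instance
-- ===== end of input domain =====

-- B replaces A's two membership dicts plus three filtering loops by ONE combined
-- membership-flag table and a single categorizing pass over it (same cost, different decomposition).

-- ===== PORT A =====
def list_compare_py (list1 : List String) (list2 : List String) : List (List (String × Int)) :=
  let lt1 := list1.foldl (fun d i => d.insert i 1) (PySem.Dict.empty : PySem.Dict String Int)
  let lt2 := list2.foldl (fun d i => d.insert i 1) (PySem.Dict.empty : PySem.Dict String Int)
  let comm := lt2.keys.foldl (fun d i => if lt1.contains i then d.insert i 1 else d)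
    (PySem.Dict.empty : PySem.Dict String Int)
  let only1 := lt1.keys.foldl (fun d i => if !(comm.contains i) then d.insert i 1 else d)
    (PySem.Dict.empty : PySem.Dict String Int)
  let only2 := lt2.keys.foldl (fun d i => if !(comm.contains i) then d.insert i 1 else d)
    (PySem.Dict.empty : PySem.Dict String Int)
  [only1.items, only2.items, comm.items]
-- ===== PORT B =====
def list_compare_py_alt (list1 : List String) (list2 : List String) : List (List (String × Int)) :=
  let flags0 := list2.foldl (fun d x => d.insert x 2) (PySem.Dict.empty : PySem.Dict String Int)
  let flags := list1.foldl (fun d x => d.insert x (PySem.Int.bor (d.getD x 0) 1)) flags0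
  let t := flags.items.foldl
    (fun (t : PySem.Dict String Int × PySem.Dict String Int × PySem.Dict String Int) p =>
      if p.2 == (3 : Int) then (t.1, t.2.1, t.2.2.insert p.1 1)
      else if p.2 == (1 : Int) then (t.1.insert p.1 1, t.2.1, t.2.2)
      else (t.1, t.2.1.insert p.1 1, t.2.2))
    (PySem.Dict.empty, PySem.Dict.empty, PySem.Dict.empty)
  [t.1.items, t.2.1.items, t.2.2.items]

-- ===== PRECONDITION & SPEC =====
def Spec_list_compare_py (list1 : List String) (list2 : List String) (out : List (List (String × Int))) : Prop := out = list_compare_py_alt list1 list2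
instance (list1 : List String) (list2 : List String) (out : List (List (String × Int))) : Decidable (Spec_list_compare_py list1 list2 out) := by unfold Spec_list_compare_py; infer_instance

-- ===== CLAIM (what is proved, stated in full; the proofs are below) =====
def Claim_equal_list_compare_py : Prop := ∀ (list1 : List String) (list2 : List String), Dom_list_compare_py list1 list2 → Spec_list_compare_py list1 list2 (list_compare_py list1 list2)

-- ===== LEMMAS AND PROOFS =====
theorem getD_fold_const (l : List String) (v : Int) (d : PySem.Dict String Int) (k : String) :
    (l.foldl (fun d i => d.insert i v) d).getD k 0 = if k ∈ l then v else d.getD k 0 := by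
  induction l generalizing d with
  | nil => simp
  | cons x xs ih =>
    simp only [List.foldl_cons, ih, PySem.Dict.getD_insert, List.mem_cons]
    by_cases hx : k = x <;> by_cases hm : k ∈ xs <;> simp [hx, hm]
theorem bor_one_idem (a : Int) : PySem.Int.bor (PySem.Int.bor a 1) 1 = PySem.Int.bor a 1 := by
  unfold PySem.Int.bor
  rcases a with n | n
  · simp
  · simp; omega
theorem getD_fold_bor (l : List String) (d : PySem.Dict String Int) (k : String) :
    (l.foldl (fun d x => d.insert x (PySem.Int.bor (d.getD x 0) 1)) d).getD k 0
      = if k ∈ l then PySem.Int.bor (d.getD k 0) 1 else d.getD k 0 := by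
  induction l generalizing d with
  | nil => simp
  | cons x xs ih =>
    simp only [List.foldl_cons, ih, PySem.Dict.getD_insert, List.mem_cons]
    by_cases hx : k = x <;> by_cases hm : k ∈ xs <;> simp [hx, hm, bor_one_idem]
theorem items_fold_if (l : List String) (c : String → Bool) (hl : l.Nodup) :
    (l.foldl (fun d i => if c i then d.insert i 1 else d)
      (PySem.Dict.empty : PySem.Dict String Int)).items
      = (l.filter c).map (fun k => (k, (1 : Int))) := by
  rw [← List.foldl_filter]
  have := PySem.Dict.items_foldl_insert_fresh (l := l.filter c) (k := fun a => a)
    (v := fun _ => (1:Int)) (d := (PySem.Dict.empty : PySem.Dict String Int))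
    (by intro a _; simp) (by simpa using hl.filter c)
  simpa using this
theorem items_fold_if_pairs (ps : List (String × Int)) (c : String × Int → Bool)
    (h : (ps.map Prod.fst).Nodup) :
    (ps.foldl (fun d p => if c p then d.insert p.1 1 else d)
      (PySem.Dict.empty : PySem.Dict String Int)).items
      = (ps.filter c).map (fun p => (p.1, (1 : Int))) := by
  rw [← List.foldl_filter]
  have := PySem.Dict.items_foldl_insert_fresh (l := ps.filter c) (k := Prod.fst)
    (v := fun _ => (1:Int)) (d := (PySem.Dict.empty : PySem.Dict String Int))
    (by intro a _; simp) ?_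
  · simpa using this
  · exact h.sublist ((List.filter_sublist (p := c) (l := ps)).map Prod.fst)
theorem triple_proj (ps : List (String × Int))
    (t0 : PySem.Dict String Int × PySem.Dict String Int × PySem.Dict String Int) :
    ps.foldl
      (fun (t : PySem.Dict String Int × PySem.Dict String Int × PySem.Dict String Int) p =>
        if p.2 == (3 : Int) then (t.1, t.2.1, t.2.2.insert p.1 1)
        else if p.2 == (1 : Int) then (t.1.insert p.1 1, t.2.1, t.2.2)
        else (t.1, t.2.1.insert p.1 1, t.2.2)) t0
    = (ps.foldl (fun d p => if !(p.2 == (3:Int)) && (p.2 == (1:Int)) then d.insert p.1 1 else d) t0.1,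
       ps.foldl (fun d p => if !(p.2 == (3:Int)) && !(p.2 == (1:Int)) then d.insert p.1 1 else d) t0.2.1,
       ps.foldl (fun d p => if p.2 == (3:Int) then d.insert p.1 1 else d) t0.2.2) := by
  induction ps generalizing t0 with
  | nil => rfl
  | cons p ps ih =>
    simp only [List.foldl_cons]
    rw [ih]
    by_cases h3 : p.2 == (3:Int) <;> by_cases h1 : p.2 == (1:Int) <;> simp [h3, h1]

theorem ports_eq (list1 list2 : List String) :
    list_compare_py list1 list2 = list_compare_py_alt list1 list2 := by
  unfold list_compare_py list_compare_py_alt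
  -- ---------- A side ----------
  have hk1 : (list1.foldl (fun d i => d.insert i 1) (PySem.Dict.empty : PySem.Dict String Int)).keys
      = PySem.Set.ofList list1 := by
    have := PySem.Dict.keys_foldl_insert (l := list1) (f := fun _ _ => (1:Int))
      (d := (PySem.Dict.empty : PySem.Dict String Int))
    simpa [PySem.Set.update_nil_left] using this
  have hk2 : (list2.foldl (fun d i => d.insert i 1) (PySem.Dict.empty : PySem.Dict String Int)).keys
      = PySem.Set.ofList list2 := by
    have := PySem.Dict.keys_foldl_insert (l := list2) (f := fun _ _ => (1:Int))
      (d := (PySem.Dict.empty : PySem.Dict String Int))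
    simpa [PySem.Set.update_nil_left] using this
  have hc1 : ∀ k, (list1.foldl (fun d i => d.insert i 1) (PySem.Dict.empty : PySem.Dict String Int)).contains k
      = decide (k ∈ list1) := by
    intro k
    rw [PySem.Dict.contains_eq_decide_mem_keys, hk1]
    simp [PySem.Set.mem_ofList]
  have hcomm : ((list2.foldl (fun d i => d.insert i 1) (PySem.Dict.empty : PySem.Dict String Int)).keys.foldl
        (fun d i => if (list1.foldl (fun d i => d.insert i 1) (PySem.Dict.empty : PySem.Dict String Int)).contains i
          then d.insert i 1 else d) (PySem.Dict.empty : PySem.Dict String Int)).items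
      = ((PySem.Set.ofList list2).filter (fun i => decide (i ∈ list1))).map (fun k => (k, (1:Int))) := by
    rw [hk2, items_fold_if _ _ (PySem.Set.nodup_ofList _)]
    congr 1
    exact List.filter_congr (fun i _ => hc1 i)
  have hck : ((list2.foldl (fun d i => d.insert i 1) (PySem.Dict.empty : PySem.Dict String Int)).keys.foldl
        (fun d i => if (list1.foldl (fun d i => d.insert i 1) (PySem.Dict.empty : PySem.Dict String Int)).contains i
          then d.insert i 1 else d) (PySem.Dict.empty : PySem.Dict String Int)).keys
      = (PySem.Set.ofList list2).filter (fun i => decide (i ∈ list1)) := by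
    have hkeq : ∀ d : PySem.Dict String Int, d.keys = d.items.map Prod.fst := fun _ => rfl
    rw [hkeq, hcomm, List.map_map]
    simp [Function.comp_def]
  have hcc : ∀ k, ((list2.foldl (fun d i => d.insert i 1) (PySem.Dict.empty : PySem.Dict String Int)).keys.foldl
        (fun d i => if (list1.foldl (fun d i => d.insert i 1) (PySem.Dict.empty : PySem.Dict String Int)).contains i
          then d.insert i 1 else d) (PySem.Dict.empty : PySem.Dict String Int)).contains k
      = (decide (k ∈ list2) && decide (k ∈ list1)) := by
    intro k
    rw [PySem.Dict.contains_eq_decide_mem_keys, hck]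
    by_cases h1 : k ∈ list1 <;> by_cases h2 : k ∈ list2 <;>
      simp [List.mem_filter, PySem.Set.mem_ofList, h1, h2]
  have honly1 : ((list1.foldl (fun d i => d.insert i 1) (PySem.Dict.empty : PySem.Dict String Int)).keys.foldl
        (fun d i => if !(((list2.foldl (fun d i => d.insert i 1) (PySem.Dict.empty : PySem.Dict String Int)).keys.foldl
        (fun d i => if (list1.foldl (fun d i => d.insert i 1) (PySem.Dict.empty : PySem.Dict String Int)).contains i
          then d.insert i 1 else d) (PySem.Dict.empty : PySem.Dict String Int)).contains i) then d.insert i 1 else d)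
        (PySem.Dict.empty : PySem.Dict String Int)).items
      = ((PySem.Set.ofList list1).filter (fun i => !decide (i ∈ list2))).map (fun k => (k, (1:Int))) := by
    rw [hk1, items_fold_if _ _ (PySem.Set.nodup_ofList _)]
    congr 1
    apply List.filter_congr
    intro i hi
    have hi1 : i ∈ list1 := (PySem.Set.mem_ofList _ _).mp hi
    rw [hcc]
    simp [hi1]
  have honly2 : ((list2.foldl (fun d i => d.insert i 1) (PySem.Dict.empty : PySem.Dict String Int)).keys.foldl
        (fun d i => if !(((list2.foldl (fun d i => d.insert i 1) (PySem.Dict.empty : PySem.Dict String Int)).keys.foldl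
        (fun d i => if (list1.foldl (fun d i => d.insert i 1) (PySem.Dict.empty : PySem.Dict String Int)).contains i
          then d.insert i 1 else d) (PySem.Dict.empty : PySem.Dict String Int)).contains i) then d.insert i 1 else d)
        (PySem.Dict.empty : PySem.Dict String Int)).items
      = ((PySem.Set.ofList list2).filter (fun i => !decide (i ∈ list1))).map (fun k => (k, (1:Int))) := by
    rw [items_fold_if _ _ (by rw [hk2]; exact PySem.Set.nodup_ofList _)]
    congr 1
    have step : ((list2.foldl (fun d i => d.insert i 1) (PySem.Dict.empty : PySem.Dict String Int)).keys).filter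
        (fun i => !(((list2.foldl (fun d i => d.insert i 1) (PySem.Dict.empty : PySem.Dict String Int)).keys.foldl
        (fun d i => if (list1.foldl (fun d i => d.insert i 1) (PySem.Dict.empty : PySem.Dict String Int)).contains i
          then d.insert i 1 else d) (PySem.Dict.empty : PySem.Dict String Int)).contains i))
        = ((list2.foldl (fun d i => d.insert i 1) (PySem.Dict.empty : PySem.Dict String Int)).keys).filter
        (fun i => !decide (i ∈ list1)) := by
      apply List.filter_congr
      intro i hi
      have hi2 : i ∈ list2 := by
        rw [hk2] at hi
        exact (PySem.Set.mem_ofList _ _).mp hi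
      rw [hcc]
      simp [hi2]
    rw [step, hk2]
  -- ---------- B side ----------
  have hkf : (list1.foldl (fun d x => d.insert x (PySem.Int.bor (d.getD x 0) 1))
      (list2.foldl (fun d x => d.insert x 2) (PySem.Dict.empty : PySem.Dict String Int))).keys
      = PySem.Set.ofList list2 ++ (PySem.Set.ofList list1).filter (fun y => !decide (y ∈ list2)) := by
    have h1 := PySem.Dict.keys_foldl_insert (l := list1)
      (f := fun d x => PySem.Int.bor (d.getD x 0) 1)
      (d := list2.foldl (fun d x => d.insert x 2) (PySem.Dict.empty : PySem.Dict String Int))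
    have h0 := PySem.Dict.keys_foldl_insert (l := list2) (f := fun _ _ => (2:Int))
      (d := (PySem.Dict.empty : PySem.Dict String Int))
    rw [h1, h0, PySem.Dict.keys_empty, PySem.Set.update_nil_left, PySem.Set.update_eq_append_filter]
    congr 1
    apply List.filter_congr
    intro y _
    simp [PySem.Set.contains, PySem.Set.mem_ofList]
  have hnf : (list1.foldl (fun d x => d.insert x (PySem.Int.bor (d.getD x 0) 1))
      (list2.foldl (fun d x => d.insert x 2) (PySem.Dict.empty : PySem.Dict String Int))).keys.Nodup := by
    rw [hkf]
    have := PySem.Dict.nodup_keys_foldl_insert (l := list1)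
      (f := fun d x => PySem.Int.bor (d.getD x 0) 1)
      (d := list2.foldl (fun d x => d.insert x 2) (PySem.Dict.empty : PySem.Dict String Int))
      (PySem.Dict.nodup_keys_foldl_insert _ _ _ PySem.Dict.nodup_keys_empty)
    rwa [hkf] at this
  have hgf : ∀ k, (list1.foldl (fun d x => d.insert x (PySem.Int.bor (d.getD x 0) 1))
      (list2.foldl (fun d x => d.insert x 2) (PySem.Dict.empty : PySem.Dict String Int))).getD k 0 = (fun k => if k ∈ list1 then (if k ∈ list2 then (3:Int) else 1) else (if k ∈ list2 then 2 else 0)) k := by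
    intro k
    rw [getD_fold_bor, getD_fold_const]
    simp only [PySem.Dict.getD_empty]
    split_ifs <;> rfl
  have hfitems : (list1.foldl (fun d x => d.insert x (PySem.Int.bor (d.getD x 0) 1))
      (list2.foldl (fun d x => d.insert x 2) (PySem.Dict.empty : PySem.Dict String Int))).items
      = (PySem.Set.ofList list2 ++ (PySem.Set.ofList list1).filter (fun y => !decide (y ∈ list2))).map
          (fun k => (k, (fun k => if k ∈ list1 then (if k ∈ list2 then (3:Int) else 1) else (if k ∈ list2 then 2 else 0)) k)) := by
    rw [PySem.Dict.items_eq_map_keys _ hnf 0, hkf]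
    exact List.map_congr_left (fun k _ => by rw [hgf])
  have hpsnd : ((list1.foldl (fun d x => d.insert x (PySem.Int.bor (d.getD x 0) 1))
      (list2.foldl (fun d x => d.insert x 2) (PySem.Dict.empty : PySem.Dict String Int))).items.map Prod.fst).Nodup := hnf
  have hB3 : ((list1.foldl (fun d x => d.insert x (PySem.Int.bor (d.getD x 0) 1))
      (list2.foldl (fun d x => d.insert x 2) (PySem.Dict.empty : PySem.Dict String Int))).items.foldl
        (fun d p => if p.2 == (3:Int) then d.insert p.1 1 else d)
        (PySem.Dict.empty : PySem.Dict String Int)).items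
      = ((PySem.Set.ofList list2).filter (fun i => decide (i ∈ list1))).map (fun k => (k, (1:Int))) := by
    rw [items_fold_if_pairs _ _ hpsnd, hfitems, List.filter_map, List.map_map]
    simp only [Function.comp_def]
    rw [List.filter_append]
    have e1 : (PySem.Set.ofList list2).filter (fun k => (fun k => if k ∈ list1 then (if k ∈ list2 then (3:Int) else 1) else (if k ∈ list2 then 2 else 0)) k == (3:Int))
        = (PySem.Set.ofList list2).filter (fun i => decide (i ∈ list1)) := by
      apply List.filter_congr
      intro k hk
      have h2 : k ∈ list2 := (PySem.Set.mem_ofList _ _).mp hk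
      by_cases h1 : k ∈ list1 <;> simp [h1, h2]
    have e2 : ((PySem.Set.ofList list1).filter (fun y => !decide (y ∈ list2))).filter
        (fun k => (fun k => if k ∈ list1 then (if k ∈ list2 then (3:Int) else 1) else (if k ∈ list2 then 2 else 0)) k == (3:Int)) = [] := by
      rw [List.filter_filter]
      apply List.filter_eq_nil_iff.mpr
      intro a ha
      have h1 : a ∈ list1 := (PySem.Set.mem_ofList _ _).mp ha
      by_cases h2 : a ∈ list2 <;> simp [h1, h2]
    rw [e1, e2, List.append_nil]
  have hB1 : ((list1.foldl (fun d x => d.insert x (PySem.Int.bor (d.getD x 0) 1))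
      (list2.foldl (fun d x => d.insert x 2) (PySem.Dict.empty : PySem.Dict String Int))).items.foldl
        (fun d p => if !(p.2 == (3:Int)) && (p.2 == (1:Int)) then d.insert p.1 1 else d)
        (PySem.Dict.empty : PySem.Dict String Int)).items
      = ((PySem.Set.ofList list1).filter (fun i => !decide (i ∈ list2))).map (fun k => (k, (1:Int))) := by
    rw [items_fold_if_pairs _ _ hpsnd, hfitems, List.filter_map, List.map_map]
    simp only [Function.comp_def]
    rw [List.filter_append]
    have e1 : (PySem.Set.ofList list2).filter (fun k => !((fun k => if k ∈ list1 then (if k ∈ list2 then (3:Int) else 1) else (if k ∈ list2 then 2 else 0)) k == (3:Int)) && ((fun k => if k ∈ list1 then (if k ∈ list2 then (3:Int) else 1) else (if k ∈ list2 then 2 else 0)) k == (1:Int))) = [] := by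
      apply List.filter_eq_nil_iff.mpr
      intro a ha
      have h2 : a ∈ list2 := (PySem.Set.mem_ofList _ _).mp ha
      by_cases h1 : a ∈ list1 <;> simp [h1, h2]
    have e2 : ((PySem.Set.ofList list1).filter (fun y => !decide (y ∈ list2))).filter
        (fun k => !((fun k => if k ∈ list1 then (if k ∈ list2 then (3:Int) else 1) else (if k ∈ list2 then 2 else 0)) k == (3:Int)) && ((fun k => if k ∈ list1 then (if k ∈ list2 then (3:Int) else 1) else (if k ∈ list2 then 2 else 0)) k == (1:Int)))
        = (PySem.Set.ofList list1).filter (fun y => !decide (y ∈ list2)) := by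
      rw [List.filter_filter]
      apply List.filter_congr
      intro a ha
      have h1 : a ∈ list1 := (PySem.Set.mem_ofList _ _).mp ha
      by_cases h2 : a ∈ list2 <;> simp [h1, h2]
    rw [e1, e2, List.nil_append]
  have hB2 : ((list1.foldl (fun d x => d.insert x (PySem.Int.bor (d.getD x 0) 1))
      (list2.foldl (fun d x => d.insert x 2) (PySem.Dict.empty : PySem.Dict String Int))).items.foldl
        (fun d p => if !(p.2 == (3:Int)) && !(p.2 == (1:Int)) then d.insert p.1 1 else d)
        (PySem.Dict.empty : PySem.Dict String Int)).items
      = ((PySem.Set.ofList list2).filter (fun i => !decide (i ∈ list1))).map (fun k => (k, (1:Int))) := by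
    rw [items_fold_if_pairs _ _ hpsnd, hfitems, List.filter_map, List.map_map]
    simp only [Function.comp_def]
    rw [List.filter_append]
    have e1 : (PySem.Set.ofList list2).filter (fun k => !((fun k => if k ∈ list1 then (if k ∈ list2 then (3:Int) else 1) else (if k ∈ list2 then 2 else 0)) k == (3:Int)) && !((fun k => if k ∈ list1 then (if k ∈ list2 then (3:Int) else 1) else (if k ∈ list2 then 2 else 0)) k == (1:Int)))
        = (PySem.Set.ofList list2).filter (fun i => !decide (i ∈ list1)) := by
      apply List.filter_congr
      intro k hk
      have h2 : k ∈ list2 := (PySem.Set.mem_ofList _ _).mp hk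
      by_cases h1 : k ∈ list1 <;> simp [h1, h2]
    have e2 : ((PySem.Set.ofList list1).filter (fun y => !decide (y ∈ list2))).filter
        (fun k => !((fun k => if k ∈ list1 then (if k ∈ list2 then (3:Int) else 1) else (if k ∈ list2 then 2 else 0)) k == (3:Int)) && !((fun k => if k ∈ list1 then (if k ∈ list2 then (3:Int) else 1) else (if k ∈ list2 then 2 else 0)) k == (1:Int))) = [] := by
      rw [List.filter_filter]
      apply List.filter_eq_nil_iff.mpr
      intro a ha
      have h1 : a ∈ list1 := (PySem.Set.mem_ofList _ _).mp ha
      by_cases h2 : a ∈ list2 <;> simp [h1, h2]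
    rw [e1, e2, List.append_nil]
  -- ---------- assemble ----------
  simp only [triple_proj]
  rw [honly1, honly2, hcomm, hB1, hB2, hB3]

-- ===== VERDICT (by name: the statement is the Claim_ definition above) =====
theorem list_compare_py_spec : Claim_equal_list_compare_py := by
  intro list1 list2 _
  unfold Spec_list_compare_py
  exact ports_eq list1 list2
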